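-- pv_equiv track=rewrite | github.com/morris2016/Spectre_bot_2.0 | brain_council/asset_council.py | _group_by_timeframe
-- ===== SOURCE A (Python) =====
-- from typing import Dict, List, Any, Optional, Tuple, Set
--
-- def _group_by_timeframe(signals: List[Dict[str, Any]]) -> Dict[str, List[Dict[str, Any]]]:
--     """
--     Group signals by timeframe.
--
--     Args:
--         signals: List of signals
--
--     Returns:
--         Dictionary mapping timeframes to signal lists
--     """
--     result = {}
--
--     for signal in signals:
--         timeframe = signal.get("timeframe", "unknown")
--         if timeframe not in result:
--             result[timeframe] = []
--         result[timeframe].append(signal)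
--
--     return result
-- ===== SOURCE B (Python) =====
-- def _group_by_timeframe(signals):
--     """Group signals by timeframe: dedup the keys once, then one filter pass per key."""
--     keys = dict.fromkeys(s.get("timeframe", "unknown") for s in signals)
--     return {tf: [s for s in signals if s.get("timeframe", "unknown") == tf] for tf in keys}
-- ===== Notes on version B (the rewrite author's own statement) =====
-- stated objective: alternative
-- what changed: A builds the dict incrementally, inserting an empty list on first sight of a key and appending to it; B first collects the distinct timeframe keys in order of first occurrence (dict.fromkeys) and then builds each group with a separate filter pass over the whole signal list.
import Mathlib
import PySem

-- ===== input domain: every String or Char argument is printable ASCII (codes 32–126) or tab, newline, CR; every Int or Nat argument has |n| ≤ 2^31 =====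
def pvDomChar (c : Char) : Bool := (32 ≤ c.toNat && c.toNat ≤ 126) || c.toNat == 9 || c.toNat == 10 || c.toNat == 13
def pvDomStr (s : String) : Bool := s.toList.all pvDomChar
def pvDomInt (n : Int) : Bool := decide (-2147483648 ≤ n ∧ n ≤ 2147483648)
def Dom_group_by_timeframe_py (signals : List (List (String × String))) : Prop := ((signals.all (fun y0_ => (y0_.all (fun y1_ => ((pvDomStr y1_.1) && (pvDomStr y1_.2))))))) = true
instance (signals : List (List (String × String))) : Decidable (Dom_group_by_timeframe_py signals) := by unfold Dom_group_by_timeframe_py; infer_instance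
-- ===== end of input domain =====

-- B replaces A's incremental dict-building with a dedup of the timeframe keys followed by one filter pass per key; alternative decomposition, same return value.


-- signal.get("timeframe", "unknown") — shared literal translation of the lookup both Pythons perform
def sigKey (signal : List (String × String)) : String :=
  PySem.Dict.getD ⟨signal⟩ "timeframe" "unknown"

-- ===== PORT A =====
def group_by_timeframe_py (signals : List (List (String × String))) : List (String × List (List (String × String))) :=
  (signals.foldl
    (fun result signal =>
      let timeframe := sigKey signal
      let result := if result.contains timeframe then result else result.insert timeframe []
      result.modify timeframe [] (fun l => l ++ [signal]))
    PySem.Dict.empty).items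

-- ===== PORT B =====
def group_by_timeframe_py_alt (signals : List (List (String × String))) : List (String × List (List (String × String))) :=
  (PySem.List.dedup (signals.map sigKey)).map
    (fun tf => (tf, signals.filter (fun s => sigKey s == tf)))

-- ===== PRECONDITION & SPEC =====
def Spec_group_by_timeframe_py (signals : List (List (String × String))) (out : List (String × List (List (String × String)))) : Prop := out = group_by_timeframe_py_alt signals
instance (signals : List (List (String × String))) (out : List (String × List (List (String × String)))) : Decidable (Spec_group_by_timeframe_py signals out) := by unfold Spec_group_by_timeframe_py; infer_instance

-- ===== CLAIM (what is proved, stated in full; the proofs are below) =====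
def Claim_equal_group_by_timeframe_py : Prop := ∀ (signals : List (List (String × String))), Dom_group_by_timeframe_py signals → Spec_group_by_timeframe_py signals (group_by_timeframe_py signals)

-- ===== LEMMAS AND PROOFS =====

-- A's "insert [] if absent, then append" step equals a single modify-with-default-[] step.
lemma step_eq_modify (d : PySem.Dict String (List (List (String × String)))) (k : String)
    (s : List (String × String)) :
    (if d.contains k then d else d.insert k []).modify k [] (fun l => l ++ [s])
      = d.modify k [] (fun l => l ++ [s]) := by
  by_cases h : d.contains k = true
  · simp [h]
  · simp only [h, Bool.false_eq_true, if_false, PySem.Dict.modify,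
      PySem.Dict.insert_insert_self, PySem.Dict.getD_insert_self,
      PySem.Dict.getD_of_not_contains d [] (by simpa using h)]

lemma foldA_eq (signals : List (List (String × String))) :
    (signals.foldl
      (fun result signal =>
        let timeframe := sigKey signal
        let result := if result.contains timeframe then result else result.insert timeframe []
        result.modify timeframe [] (fun l => l ++ [signal]))
      PySem.Dict.empty)
    = (signals.map (fun s => (sigKey s, s))).foldl
        (fun d p => d.modify p.1 [] (fun l => l ++ [p.2])) PySem.Dict.empty := by
  rw [List.foldl_map]
  exact PySem.List.foldl_congr_mem signals _ _ PySem.Dict.empty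
    (fun d s _ => step_eq_modify d (sigKey s) s)

theorem group_by_timeframe_py_eq (signals : List (List (String × String))) :
    group_by_timeframe_py signals = group_by_timeframe_py_alt signals := by
  unfold group_by_timeframe_py group_by_timeframe_py_alt
  rw [foldA_eq]
  set pairs := signals.map (fun s => (sigKey s, s)) with hpairs
  set d := pairs.foldl (fun d p => d.modify p.1 [] (fun l => l ++ [p.2])) PySem.Dict.empty with hd
  have hnd : d.keys.Nodup := by
    rw [hd]
    exact PySem.Dict.nodup_keys_foldl_modify_key pairs Prod.fst [] (fun d p => fun l => l ++ [p.2])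
      PySem.Dict.empty PySem.Dict.nodup_keys_empty
  rw [PySem.Dict.items_eq_map_keys d hnd []]
  have hkeys : d.keys = PySem.List.dedup (signals.map sigKey) := by
    rw [hd]
    rw [PySem.Dict.keys_foldl_modify_key pairs Prod.fst [] (fun d p => fun l => l ++ [p.2]) PySem.Dict.empty]
    simp [hpairs, List.map_map, PySem.Dict.keys_empty]
    rfl
  rw [hkeys]
  apply List.map_congr_left
  intro tf _
  congr 1
  rw [hd, PySem.Dict.getD_foldl_modify_append]
  simp [hpairs, PySem.Dict.getD_empty, List.filter_map, Function.comp_def]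

-- ===== VERDICT (by name: the statement is the Claim_ definition above) =====
theorem group_by_timeframe_py_spec : Claim_equal_group_by_timeframe_py := by
  intro signals _
  unfold Spec_group_by_timeframe_py
  exact group_by_timeframe_py_eq signals
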